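-- pv_equiv track=rewrite | github.com/n1tz53/CodilitySolutions | Flags.py | solution
-- ===== SOURCE A (Python) =====
-- def solution(A):
--     n = len(A)
--     if n < 3:
--         return 0
--     peaks = []
--     for i in range(1, n - 1):
--         if A[i] > max(A[i - 1], A[i + 1]):
--             peaks.append(i)
--     if len(peaks) < 3:
--         return len(peaks)
--     else:
--         low, high = 1, len(peaks)
--         ans = 1
--         while low <= high:
--             mid = (low + high) // 2
--             flag, last, ctr = mid, 0, 1
--             for i in range(1, len(peaks)):
--                 if peaks[i] - peaks[last] >= flag:
--                     ctr += 1
--                     last = i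
--             if flag <= ctr:
--                 low = mid + 1
--                 ans = max(ans, flag)
--             else:
--                 high = mid - 1
--         return ans
-- ===== SOURCE B (Python) =====
-- def solution(A):
--     n = len(A)
--     if n < 3:
--         return 0
--     peaks = [i for i in range(1, n - 1) if A[i] > A[i - 1] and A[i] > A[i + 1]]
--     m = len(peaks)
--     if m < 3:
--         return m
--
--     def count(f):
--         c = 1
--         last = peaks[0]
--         for p in peaks[1:]:
--             if p - last >= f:
--                 c += 1
--                 last = p
--         return c
--
--     ans, f = 1, 2
--     while f <= m and count(f) >= f:
--         ans = f
--         f += 1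
--     return ans
-- ===== Notes on version B (the rewrite author's own statement) =====
-- stated objective: alternative
-- what changed: B builds the peak list with a comprehension, counts greedily placed flags by a recursion over the peak values (instead of A's index-based loop with repeated peak-list indexing), and replaces A's binary search over the flag count by an ascending linear scan with early exit, relying on monotonicity of the greedy count.
import Mathlib
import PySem

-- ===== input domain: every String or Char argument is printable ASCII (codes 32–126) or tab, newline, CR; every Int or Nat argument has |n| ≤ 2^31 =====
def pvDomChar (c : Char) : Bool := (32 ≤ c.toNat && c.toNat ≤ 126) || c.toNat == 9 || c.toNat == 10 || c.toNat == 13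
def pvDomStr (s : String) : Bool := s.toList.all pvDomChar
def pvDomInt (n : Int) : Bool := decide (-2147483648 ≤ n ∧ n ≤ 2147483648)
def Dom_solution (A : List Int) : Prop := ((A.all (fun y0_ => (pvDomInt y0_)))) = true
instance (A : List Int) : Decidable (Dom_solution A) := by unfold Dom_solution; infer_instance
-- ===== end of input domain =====

-- B replaces A's binary search over the flag count by an ascending linear scan with early
-- exit and a value-based greedy count over the peak list (objective: alternative, same results).

-- ===== PORT A =====
-- peaks-collecting loop of A (indices 1..n-2 are always in range, so pyGetD is exact here)
def solPeaks (A : List Int) : List Int :=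
  (PySem.List.pyRange 1 ((A.length : Int) - 1) 1).foldl
    (fun peaks i =>
      if PySem.List.pyGetD A i 0 > max (PySem.List.pyGetD A (i - 1) 0) (PySem.List.pyGetD A (i + 1) 0)
      then peaks ++ [i] else peaks) []

-- A's inner for-loop: state (last, ctr), indices into peaks (always in range)
def solCtr (peaks : List Int) (flag : Int) : Int × Int :=
  (PySem.List.pyRange 1 (peaks.length : Int) 1).foldl
    (fun st i =>
      if PySem.List.pyGetD peaks i 0 - PySem.List.pyGetD peaks st.1 0 ≥ flag
      then (i, st.2 + 1) else st) (0, 1)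

-- A's while-loop binary search
def solBS (peaks : List Int) (low high ans : Int) : Int :=
  if h : low ≤ high then
    let mid := PySem.Int.floordiv (low + high) 2
    if mid ≤ (solCtr peaks mid).2
    then solBS peaks (mid + 1) high (max ans mid)
    else solBS peaks low (mid - 1) ans
  else ans
termination_by (high + 1 - low).toNat
decreasing_by
  · have hb := PySem.Int.floordiv_two_mid_bounds h
    omega
  · have hb := PySem.Int.floordiv_two_mid_bounds h
    omega

def solution (A : List Int) : Int :=
  if (A.length : Int) < 3 then 0
  else
    let peaks := solPeaks A
    if (peaks.length : Int) < 3 then (peaks.length : Int)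
    else solBS peaks 1 (peaks.length : Int) 1

-- ===== PORT B =====
-- B's peak comprehension
def altPeaks (A : List Int) : List Int :=
  (PySem.List.pyRange 1 ((A.length : Int) - 1) 1).filter
    (fun i => decide (PySem.List.pyGetD A i 0 > PySem.List.pyGetD A (i - 1) 0) &&
              decide (PySem.List.pyGetD A i 0 > PySem.List.pyGetD A (i + 1) 0))

-- B's count(f): greedy over the peak VALUES, recursion on the list
def altCountGo (f : Int) : Int → Int → List Int → Int
  | _, c, [] => c
  | last, c, p :: rest =>
    if p - last ≥ f then altCountGo f p (c + 1) rest else altCountGo f last c rest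

def altCount (f p0 : Int) (rest : List Int) : Int := altCountGo f p0 1 rest

-- B's while-loop: ascending f with early exit
def altSearch (p0 : Int) (rest : List Int) (m f ans : Int) : Int :=
  if h : f ≤ m ∧ f ≤ altCount f p0 rest then altSearch p0 rest m (f + 1) f else ans
termination_by (m + 1 - f).toNat
decreasing_by omega

def solution_alt (A : List Int) : Int :=
  if (A.length : Int) < 3 then 0
  else
    let peaks := altPeaks A
    if (peaks.length : Int) < 3 then (peaks.length : Int)
    else
      match peaks with
      | [] => 0          -- unreachable: peaks has length ≥ 3 here
      | p0 :: rest => altSearch p0 rest (peaks.length : Int) 2 1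

-- ===== PRECONDITION & SPEC =====
def Spec_solution (A : List Int) (out : Int) : Prop := out = solution_alt A
instance (A : List Int) (out : Int) : Decidable (Spec_solution A out) := by unfold Spec_solution; infer_instance

-- ===== CLAIM (what is proved, stated in full; the proofs are below) =====
def Claim_equal_solution : Prop := ∀ (A : List Int), Dom_solution A → Spec_solution A (solution A)

-- ===== LEMMAS AND PROOFS =====

lemma peaks_eq (A : List Int) : solPeaks A = altPeaks A := by
  unfold solPeaks altPeaks
  rw [PySem.List.foldl_append_ite_eq_filter]
  rw [List.nil_append]
  apply List.filter_congr
  intro i _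
  simp

lemma peaks_sorted (A : List Int) : (altPeaks A).Pairwise (· ≤ ·) := by
  unfold altPeaks
  exact ((PySem.List.pairwise_lt_pyRange_one _ _).filter _).imp (fun h => le_of_lt h)

lemma ctr_loop (peaks : List Int) (f : Int) :
    ∀ (k : Nat) (j lastn : Nat) (ctr : Int), peaks.length - j ≤ k → lastn < j →
    ((PySem.List.pyRange (j : Int) (peaks.length : Int) 1).foldl
      (fun st i =>
        if PySem.List.pyGetD peaks i 0 - PySem.List.pyGetD peaks st.1 0 ≥ f
        then (i, st.2 + 1) else st) ((lastn : Int), ctr)).2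
    = altCountGo f (peaks.getD lastn 0) ctr (peaks.drop j) := by
  intro k
  induction k with
  | zero =>
    intro j lastn ctr hk _
    have hj : peaks.length ≤ j := by omega
    rw [PySem.List.pyRange_one_eq_nil (by exact_mod_cast hj), List.drop_eq_nil_of_le hj]
    simp [altCountGo]
  | succ k ih =>
    intro j lastn ctr hk hlast
    by_cases hj : peaks.length ≤ j
    · rw [PySem.List.pyRange_one_eq_nil (by exact_mod_cast hj), List.drop_eq_nil_of_le hj]
      simp [altCountGo]
    · rw [not_le] at hj
      rw [PySem.List.pyRange_one_cons (by exact_mod_cast hj)]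
      rw [List.drop_eq_getElem_cons hj]
      simp only [List.foldl_cons, altCountGo, PySem.List.pyGetD_natCast]
      have hgd : peaks.getD j 0 = peaks[j] := List.getD_eq_getElem peaks 0 hj
      rw [hgd]
      by_cases hcond : peaks[j] - peaks.getD lastn 0 ≥ f
      · rw [if_pos hcond, if_pos hcond]
        have : ((j : Int) + 1) = ((j + 1 : Nat) : Int) := by push_cast; ring
        rw [this]
        have := ih (j + 1) j (ctr + 1) (by omega) (by omega)
        rw [hgd] at this
        exact this
      · rw [if_neg hcond, if_neg hcond]
        have : ((j : Int) + 1) = ((j + 1 : Nat) : Int) := by push_cast; ring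
        rw [this]
        exact ih (j + 1) lastn ctr (by omega) (by omega)

lemma go_ge (f : Int) : ∀ (rest : List Int) (last c : Int), c ≤ altCountGo f last c rest := by
  intro rest
  induction rest with
  | nil => intro last c; simp [altCountGo]
  | cons p r ih =>
    intro last c
    simp only [altCountGo]
    split
    · exact le_trans (by omega) (ih p (c + 1))
    · exact ih last c

lemma go_le (f : Int) : ∀ (rest : List Int) (last c : Int),
    altCountGo f last c rest ≤ c + (rest.length : Int) := by
  intro rest
  induction rest with
  | nil => intro last c; simp [altCountGo]
  | cons p r ih =>
    intro last c
    simp only [altCountGo, List.length_cons]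
    split
    · exact le_trans (ih p (c + 1)) (by push_cast; omega)
    · exact le_trans (ih last c) (by push_cast; omega)

lemma go_mono (f g : Int) (hfg : f ≤ g) :
    ∀ (rest : List Int) (lastf lastg cf cg : Int),
      rest.Pairwise (· ≤ ·) → (∀ p ∈ rest, lastf ≤ p) →
      cg ≤ cf → (cg = cf → lastf ≤ lastg) →
      altCountGo g lastg cg rest ≤ altCountGo f lastf cf rest := by
  intro rest
  induction rest with
  | nil => intro lastf lastg cf cg _ _ hc _; simpa [altCountGo] using hc
  | cons p r ih =>
    intro lastf lastg cf cg hpw hlo hc heq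
    have hpw' : r.Pairwise (· ≤ ·) := hpw.tail
    have hpr : ∀ q ∈ r, p ≤ q := fun _ hq => List.rel_of_pairwise_cons hpw hq
    have hlp : lastf ≤ p := hlo p (List.mem_cons_self)
    have hlo' : ∀ q ∈ r, lastf ≤ q := fun q hq => hlo q (List.mem_cons_of_mem _ hq)
    simp only [altCountGo]
    by_cases hg : p - lastg ≥ g
    · rw [if_pos hg]
      by_cases hf : p - lastf ≥ f
      · rw [if_pos hf]
        exact ih p p (cf + 1) (cg + 1) hpw' hpr (by omega) (fun _ => le_refl _)
      · rw [if_neg hf]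
        -- if counts were equal, f would fire too
        have hlt : cg < cf := by
          rcases lt_or_eq_of_le hc with h | h
          · exact h
          · exact absurd (by have := heq h; omega) hf
        exact ih lastf p cf (cg + 1) hpw' hlo' (by omega) (fun _ => hlp)
    · rw [if_neg hg]
      by_cases hf : p - lastf ≥ f
      · rw [if_pos hf]
        exact ih p lastg (cf + 1) cg hpw' hpr (by omega) (by omega)
      · rw [if_neg hf]
        exact ih lastf lastg cf cg hpw' hlo' hc heq

lemma c_anti (p0 : Int) (rest : List Int) (hs : (p0 :: rest).Pairwise (· ≤ ·))
    {j k : Int} (hjk : j ≤ k) :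
    altCountGo k p0 1 rest ≤ altCountGo j p0 1 rest :=
  go_mono j k hjk rest p0 p0 1 1 hs.tail (fun _ hq => List.rel_of_pairwise_cons hs hq) le_rfl (fun _ => le_rfl)

lemma ctr_snd (p0 : Int) (rest : List Int) (flag : Int) :
    (solCtr (p0 :: rest) flag).2 = altCountGo flag p0 1 rest := by
  have h := ctr_loop (p0 :: rest) flag (p0 :: rest).length 1 0 1 (by omega) (by omega)
  simpa [solCtr] using h

lemma bs_spec (p0 : Int) (rest : List Int) (hs : (p0 :: rest).Pairwise (· ≤ ·)) :
    ∀ (n : Nat) (low high ans : Int), (high + 1 - low).toNat ≤ n →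
      1 ≤ ans → ans ≤ low → low ≤ ans + 1 → ans ≤ altCountGo ans p0 1 rest →
      (∀ k, 1 ≤ k → k ≤ altCountGo k p0 1 rest → k ≤ high ∨ k ≤ ans) →
      (solBS (p0 :: rest) low high ans ≤ altCountGo (solBS (p0 :: rest) low high ans) p0 1 rest
       ∧ 1 ≤ solBS (p0 :: rest) low high ans
       ∧ ∀ k, 1 ≤ k → k ≤ altCountGo k p0 1 rest → k ≤ solBS (p0 :: rest) low high ans) := by
  intro n
  induction n with
  | zero =>
    intro low high ans hfuel h1 h2 h3 hP hall
    have hlh : ¬ low ≤ high := by omega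
    rw [solBS, dif_neg hlh]
    refine ⟨hP, h1, fun k hk1 hkP => ?_⟩
    rcases hall k hk1 hkP with h | h <;> omega
  | succ n ih =>
    intro low high ans hfuel h1 h2 h3 hP hall
    by_cases hlh : low ≤ high
    · have hb := PySem.Int.floordiv_two_mid_bounds hlh
      set mid := PySem.Int.floordiv (low + high) 2 with hmid
      rw [solBS, dif_pos hlh]
      simp only [← hmid, ctr_snd]
      by_cases hc : mid ≤ altCountGo mid p0 1 rest
      · rw [if_pos hc]
        have hmax : max ans mid = mid := by omega
        rw [hmax]
        exact ih (mid + 1) high mid (by omega) (by omega) (by omega) (by omega) hc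
          (fun k hk1 hkP => by rcases hall k hk1 hkP with h | h <;> omega)
      · rw [if_neg hc]
        refine ih low (mid - 1) ans (by omega) h1 h2 h3 hP (fun k hk1 hkP => ?_)
        rcases hall k hk1 hkP with h | h
        · by_cases hkm : k ≤ mid - 1
          · exact Or.inl hkm
          · exfalso
            have hmk : mid ≤ k := by omega
            have := c_anti p0 rest hs hmk
            omega
        · exact Or.inr h
    · have hfuel0 : (high + 1 - low).toNat ≤ 0 := by omega
      rw [solBS, dif_neg hlh]
      refine ⟨hP, h1, fun k hk1 hkP => ?_⟩
      rcases hall k hk1 hkP with h | h <;> omega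

lemma lin_spec (p0 : Int) (rest : List Int) (hs : (p0 :: rest).Pairwise (· ≤ ·)) (m : Int)
    (hm : m = 1 + (rest.length : Int)) :
    ∀ (n : Nat) (f ans : Int), (m + 1 - f).toNat ≤ n →
      1 ≤ ans → f = ans + 1 → ans ≤ altCountGo ans p0 1 rest →
      (altSearch p0 rest m f ans ≤ altCountGo (altSearch p0 rest m f ans) p0 1 rest
       ∧ 1 ≤ altSearch p0 rest m f ans
       ∧ ∀ k, 1 ≤ k → k ≤ altCountGo k p0 1 rest → k ≤ altSearch p0 rest m f ans) := by
  intro n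
  induction n with
  | zero =>
    intro f ans hfuel h1 hf hP
    have hcond : ¬ (f ≤ m ∧ f ≤ altCount f p0 rest) := by
      rintro ⟨hfm, -⟩; omega
    rw [altSearch, dif_neg hcond]
    refine ⟨hP, h1, fun k hk1 hkP => ?_⟩
    have := go_le k rest p0 1
    omega
  | succ n ih =>
    intro f ans hfuel h1 hf hP
    by_cases hcond : f ≤ m ∧ f ≤ altCount f p0 rest
    · rw [altSearch, dif_pos hcond]
      exact ih (f + 1) f (by omega) (by omega) rfl hcond.2
    · rw [altSearch, dif_neg hcond]
      refine ⟨hP, h1, fun k hk1 hkP => ?_⟩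
      by_cases hka : k ≤ ans
      · exact hka
      · exfalso
        have hfk : f ≤ k := by omega
        have hkm : k ≤ m := by have := go_le k rest p0 1; omega
        have hcf : f ≤ altCountGo f p0 1 rest := by
          have := c_anti p0 rest hs hfk
          omega
        exact hcond ⟨by omega, hcf⟩

lemma sol_eq (A : List Int) : solution A = solution_alt A := by
  unfold solution solution_alt
  by_cases h3 : (A.length : Int) < 3
  · rw [if_pos h3, if_pos h3]
  · rw [if_neg h3, if_neg h3]
    simp only [peaks_eq]
    by_cases hm : ((altPeaks A).length : Int) < 3
    · rw [if_pos hm, if_pos hm]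
    · rw [if_neg hm, if_neg hm]
      obtain ⟨p0, rest, hpk⟩ : ∃ p0 rest, altPeaks A = p0 :: rest := by
        cases h : altPeaks A with
        | nil => rw [h] at hm; simp at hm
        | cons a l => exact ⟨a, l, rfl⟩
      have hs : (p0 :: rest).Pairwise (· ≤ ·) := hpk ▸ peaks_sorted A
      rw [hpk]; dsimp only
      have hm3 : 3 ≤ ((p0 :: rest).length : Int) := by
        rw [hpk] at hm; omega
      have hmlen : ((p0 :: rest).length : Int) = 1 + (rest.length : Int) := by
        push_cast [List.length_cons]; ring
      have hP1 : (1 : Int) ≤ altCountGo 1 p0 1 rest := go_ge 1 rest p0 1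
      have hall : ∀ k : Int, 1 ≤ k → k ≤ altCountGo k p0 1 rest →
          k ≤ ((p0 :: rest).length : Int) ∨ k ≤ 1 := by
        intro k hk1 hkP
        have := go_le k rest p0 1
        omega
      obtain ⟨hb1, hb2, hb3⟩ := bs_spec p0 rest hs ((p0 :: rest).length : Int).toNat
        1 ((p0 :: rest).length : Int) 1 (by omega) le_rfl le_rfl (by omega) hP1 hall
      obtain ⟨hl1, hl2, hl3⟩ := lin_spec p0 rest hs ((p0 :: rest).length : Int) hmlen
        ((((p0 :: rest).length : Int)) - 1).toNat 2 1 (by omega) le_rfl rfl hP1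
      have hbl := hb3 _ hl2 hl1
      have hlb := hl3 _ hb2 hb1
      omega

-- ===== VERDICT (by name: the statement is the Claim_ definition above) =====
theorem solution_spec : Claim_equal_solution := by
  intro A _
  unfold Spec_solution
  exact sol_eq A
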